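-- pv_equiv track=rewrite | github.com/SyzTrust/syztrust | board_manager/ETMUtils.py | _syz_hash64
-- ===== SOURCE A (Python) =====
-- def _mix(x):
--     x ^= x >> 23
--     x *= 0x2127599bf4325c37
--     x ^= x >> 47
--     return x & 0xFFFFFFFFFFFFFFFF # uint64
--
-- def _syz_hash64(a,b,seed=0xdeadbeef):
--     m = 0x880355f21e6d1965
--     h = seed ^ (b * m)
--     h ^= _mix(a)
--     h *= m
--     x = (a >> b) | (a << (32-b))
--     v = 0
--     b &= 7
--     for i in range(b,0,-1):
--         v ^= (x & (0xFF << ((i-1)*8)))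
--     h ^= _mix(v)
--     h *= m
--     return _mix(h)
-- ===== SOURCE B (Python) =====
-- def _mix(x):
--     x ^= x >> 23
--     x *= 0x2127599bf4325c37
--     x ^= x >> 47
--     return x & 0xFFFFFFFFFFFFFFFF # uint64
--
-- def _syz_hash64(a, b, seed=0xdeadbeef):
--     m = 0x880355f21e6d1965
--     x = (a >> b) | (a << (32 - b))
--     # closed form for the byte-XOR loop: the masks are disjoint, so the XOR of
--     # the low (b & 7) bytes of x is just x masked to its low 8*(b & 7) bits
--     v = x & ((1 << (8 * (b & 7))) - 1)
--     return _mix((((seed ^ (b * m)) ^ _mix(a)) * m ^ _mix(v)) * m)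
-- ===== Notes on version B (the rewrite author's own statement) =====
-- stated objective: simpler
-- what changed: The byte-extracting XOR loop over range(b&7,0,-1) is replaced by the closed-form single mask x & ((1 << (8*(b&7))) - 1) (the per-byte masks are disjoint, so XOR-accumulating them equals masking the low b&7 bytes), and the sequential h-accumulator is condensed into one expression.
import Mathlib
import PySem

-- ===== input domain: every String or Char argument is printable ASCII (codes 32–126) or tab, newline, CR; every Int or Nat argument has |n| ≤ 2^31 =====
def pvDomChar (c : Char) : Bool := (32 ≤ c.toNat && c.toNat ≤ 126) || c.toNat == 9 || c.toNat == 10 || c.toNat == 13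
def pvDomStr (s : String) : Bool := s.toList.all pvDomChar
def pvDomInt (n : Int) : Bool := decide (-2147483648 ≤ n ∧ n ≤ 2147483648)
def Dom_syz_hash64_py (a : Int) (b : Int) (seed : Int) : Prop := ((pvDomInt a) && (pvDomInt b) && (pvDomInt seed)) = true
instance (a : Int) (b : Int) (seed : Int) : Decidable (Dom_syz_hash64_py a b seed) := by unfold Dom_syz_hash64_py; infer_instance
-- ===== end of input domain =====

-- B replaces A's byte-extracting XOR loop by the equivalent single low-bits mask
-- x & ((1 << (8*(b & 7))) - 1) and condenses the h-accumulator into one expression (objective: simpler).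

-- helper shared by both Pythons: _mix (byte-identical in Source A and Source B)
def pvMix (x : Int) : Int :=
  let x1 := PySem.Int.bxor x (x >>> (23 : Nat))
  let x2 := x1 * 0x2127599bf4325c37
  let x3 := PySem.Int.bxor x2 (x2 >>> (47 : Nat))
  PySem.Int.band x3 0xFFFFFFFFFFFFFFFF

-- ===== PORT A =====
def syz_hash64_py (a : Int) (b : Int) (seed : Int) : Int :=
  let m : Int := 0x880355f21e6d1965
  let h := PySem.Int.bxor seed (b * m)
  let h := PySem.Int.bxor h (pvMix a)
  let h := h * m
  -- shifts are faithful for 0 ≤ b ≤ 32 (Pre_); Python raises ValueError outside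
  let x := PySem.Int.bor (a >>> b.toNat) (a <<< (32 - b).toNat)
  let b := PySem.Int.band b 7
  let v := (PySem.List.pyRange b 0 (-1)).foldl
      (fun v i => PySem.Int.bxor v (PySem.Int.band x ((255 : Int) <<< ((i - 1) * 8).toNat))) 0
  let h := PySem.Int.bxor h (pvMix v)
  let h := h * m
  pvMix h

-- ===== PORT B =====
def syz_hash64_py_alt (a : Int) (b : Int) (seed : Int) : Int :=
  let m : Int := 0x880355f21e6d1965
  let x := PySem.Int.bor (a >>> b.toNat) (a <<< (32 - b).toNat)
  let v := PySem.Int.band x (((1 : Int) <<< ((8 : Int) * PySem.Int.band b 7).toNat) - 1)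
  pvMix ((PySem.Int.bxor ((PySem.Int.bxor (PySem.Int.bxor seed (b * m)) (pvMix a)) * m) (pvMix v)) * m)

-- ===== PRECONDITION & SPEC =====
-- Python raises ValueError ("negative shift count") for b < 0 (a >> b) and for b > 32 (a << (32-b));
-- Pre_ admits exactly the inputs on which A returns.
def Pre_syz_hash64_py (a : Int) (b : Int) (seed : Int) : Prop := 0 ≤ b ∧ b ≤ 32
instance (a : Int) (b : Int) (seed : Int) : Decidable (Pre_syz_hash64_py a b seed) := by unfold Pre_syz_hash64_py; infer_instance
def pvWitness_syz_hash64_py : Int × Int × Int := (5, 11, 7)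

def Spec_syz_hash64_py (a : Int) (b : Int) (seed : Int) (out : Int) : Prop := out = syz_hash64_py_alt a b seed
instance (a : Int) (b : Int) (seed : Int) (out : Int) : Decidable (Spec_syz_hash64_py a b seed out) := by unfold Spec_syz_hash64_py; infer_instance

-- ===== CLAIM (what is proved, stated in full; the proofs are below) =====
def Claim_equal_syz_hash64_py : Prop := ∀ (a : Int) (b : Int) (seed : Int), Dom_syz_hash64_py a b seed → Pre_syz_hash64_py a b seed → Spec_syz_hash64_py a b seed (syz_hash64_py a b seed)

-- ===== LEMMAS AND PROOFS =====

theorem pvAndAddLdiff (M n : Nat) : (M &&& n) + Nat.ldiff M n = M := by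
  induction M using Nat.binaryRec generalizing n with
  | zero => simp [Nat.ldiff]
  | bit a m ih =>
    cases n using Nat.bitCasesOn with
    | bit b k =>
      rw [Nat.land_bit, Nat.ldiff_bit, Nat.bit_val, Nat.bit_val, Nat.bit_val]
      have := ih k
      cases a <;> cases b <;> simp <;> omega

theorem pvBandNegSucc (n M : Nat) : PySem.Int.band (Int.negSucc n) (M : Int) = ((Nat.ldiff M n : Nat) : Int) := by
  have h : M - (M &&& n) = Nat.ldiff M n := by have := pvAndAddLdiff M n; omega
  rw [← h]; simp [PySem.Int.band]

theorem pvDisjNat (n P Q : Nat) (h : P &&& Q = 0) : (n &&& P) ^^^ (n &&& Q) = n &&& (P ||| Q) := by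
  apply Nat.eq_of_testBit_eq; intro i
  have hi : (P &&& Q).testBit i = Nat.testBit 0 i := by rw [h]
  simp only [Nat.testBit_and, Nat.testBit_xor, Nat.testBit_or, Nat.zero_testBit] at *
  cases hn : n.testBit i <;> cases hP : P.testBit i <;> cases hQ : Q.testBit i <;> simp_all

theorem pvDisjLdiff (m P Q : Nat) (h : P &&& Q = 0) :
    (Nat.ldiff P m) ^^^ (Nat.ldiff Q m) = Nat.ldiff (P ||| Q) m := by
  apply Nat.eq_of_testBit_eq; intro i
  have hi : (P &&& Q).testBit i = Nat.testBit 0 i := by rw [h]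
  simp only [Nat.testBit_and, Nat.testBit_xor, Nat.testBit_or, Nat.testBit_ldiff, Nat.zero_testBit] at *
  cases hm : m.testBit i <;> cases hP : P.testBit i <;> cases hQ : Q.testBit i <;> simp_all

-- XOR of two disjointly-masked pieces of x is x masked by the union (both signs of x)
theorem pvDisjInt (x : Int) (P Q : Nat) (h : P &&& Q = 0) :
    PySem.Int.bxor (PySem.Int.band x (P : Int)) (PySem.Int.band x (Q : Int))
      = PySem.Int.band x ((P ||| Q : Nat) : Int) := by
  cases x with
  | ofNat n =>
    show PySem.Int.bxor (PySem.Int.band (n : Int) (P : Int)) (PySem.Int.band (n : Int) (Q : Int))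
        = PySem.Int.band (n : Int) ((P ||| Q : Nat) : Int)
    rw [PySem.Int.band_natCast, PySem.Int.band_natCast, PySem.Int.band_natCast, PySem.Int.bxor_natCast]
    exact congrArg _ (pvDisjNat n P Q h)
  | negSucc n =>
    rw [pvBandNegSucc, pvBandNegSucc, pvBandNegSucc, PySem.Int.bxor_natCast]
    exact congrArg _ (pvDisjLdiff n P Q h)

theorem pvMaskDisj (b j : Nat) :
    ((2^(8*(b-(j+1))) - 1) <<< (8*(j+1))) &&& (255 <<< (8*j)) = 0 := by
  apply Nat.eq_of_testBit_eq; intro i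
  have h255 : (255 : Nat) = 2^8 - 1 := rfl
  simp only [Nat.testBit_and, Nat.testBit_shiftLeft, h255, Nat.testBit_two_pow_sub_one, Nat.zero_testBit]
  rw [Bool.eq_iff_iff]
  simp only [Bool.and_eq_true, decide_eq_true_eq, Bool.false_eq_true, iff_false, not_and]
  omega

theorem pvMaskUnion (b j : Nat) (h : j + 1 ≤ b) :
    ((2^(8*(b-(j+1))) - 1) <<< (8*(j+1))) ||| (255 <<< (8*j)) = (2^(8*(b-j)) - 1) <<< (8*j) := by
  apply Nat.eq_of_testBit_eq; intro i
  have h255 : (255 : Nat) = 2^8 - 1 := rfl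
  simp only [Nat.testBit_or, Nat.testBit_shiftLeft, h255, Nat.testBit_two_pow_sub_one]
  rw [Bool.eq_iff_iff]
  simp only [Bool.or_eq_true, Bool.and_eq_true, decide_eq_true_eq]
  omega

theorem pvRangeSucc (j : Nat) :
    PySem.List.pyRange (↑(j+1)) 0 (-1) = ((j:Int)+1) :: PySem.List.pyRange ↑j 0 (-1) := by
  simp [PySem.List.pyRange, List.range_succ_eq_map, List.map_map]
  rcases Nat.eq_zero_or_pos j with h | h
  · subst h; simp
  · rw [if_pos h]
    refine List.map_congr_left ?_
    intro k _; simp [Function.comp, Nat.succ_eq_add_one]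

theorem pvLoopAux (x : Int) (b : Nat) :
    ∀ j, j ≤ b →
      (PySem.List.pyRange (↑j) 0 (-1)).foldl
          (fun v i => PySem.Int.bxor v (PySem.Int.band x ((255 : Int) <<< ((i - 1) * 8).toNat)))
          (PySem.Int.band x (((2^(8*(b-j)) - 1) <<< (8*j) : Nat) : Int))
        = PySem.Int.band x ((2^(8*b) - 1 : Nat) : Int) := by
  intro j
  induction j with
  | zero =>
    intro _
    simp [PySem.List.pyRange]
  | succ j ih =>
    intro hj
    rw [pvRangeSucc, List.foldl_cons]
    have e1 : ((((j:Int)+1) - 1) * 8).toNat = 8*j := by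
      have : (((j:Int)+1) - 1) * 8 = ((8*j : Nat) : Int) := by push_cast; ring
      rw [this, Int.toNat_natCast]
    rw [e1]
    have e2 : (255:Int) <<< ((8*j : Nat) : Int) = ((255 <<< (8*j) : Nat) : Int) :=
      Int.shiftLeft_natCast 255 (8*j)
    rw [e2, pvDisjInt x _ _ (pvMaskDisj b j), pvMaskUnion b j hj]
    exact ih (Nat.le_of_succ_le hj)

theorem pvLoopEq (x : Int) (k : Nat) :
    (PySem.List.pyRange (↑k) 0 (-1)).foldl
        (fun v i => PySem.Int.bxor v (PySem.Int.band x ((255 : Int) <<< ((i - 1) * 8).toNat))) 0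
      = PySem.Int.band x ((2^(8*k) - 1 : Nat) : Int) := by
  have h := pvLoopAux x k k (le_refl k)
  have e : (((2^(8*(k-k)) - 1) <<< (8*k) : Nat) : Int) = 0 := by
    simp
  rw [e] at h
  simpa using h

theorem pvOneShift (k : Nat) : ((1:Int) <<< k) = ((2^k : Nat) : Int) := by
  have h : ((1:Nat) : Int) <<< k = ((1 <<< k : Nat) : Int) := Int.mem_toNat?.mp rfl
  simpa [Nat.shiftLeft_eq] using h

-- ===== VERDICT (by name: the statement is the Claim_ definition above) =====
theorem syz_hash64_py_spec : Claim_equal_syz_hash64_py := by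
  intro a b seed _ hpre
  obtain ⟨hb0, _⟩ := hpre
  obtain ⟨bn, rfl⟩ := Int.eq_ofNat_of_zero_le hb0
  unfold Spec_syz_hash64_py syz_hash64_py syz_hash64_py_alt
  simp only []
  have hband : PySem.Int.band (↑bn) 7 = ((bn &&& 7 : Nat) : Int) := by
    have h7 : (7 : Int) = ((7 : Nat) : Int) := rfl
    rw [h7, PySem.Int.band_natCast]
  rw [hband, pvLoopEq]
  have e8 : ((8 : Int) * ((bn &&& 7 : Nat) : Int)).toNat = 8 * (bn &&& 7) := by
    have : (8 : Int) * ((bn &&& 7 : Nat) : Int) = ((8 * (bn &&& 7) : Nat) : Int) := by push_cast; ring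
    rw [this, Int.toNat_natCast]
  rw [e8, pvOneShift]
  have emask : (((2^(8*(bn &&& 7)) : Nat) : Int)) - 1 = ((2^(8*(bn &&& 7)) - 1 : Nat) : Int) := by
    have h1 : (1:Nat) ≤ 2^(8*(bn &&& 7)) := Nat.one_le_two_pow
    push_cast [h1]
    ring
  rw [emask]
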